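-- pv_equiv track=rewrite | github.com/Ace1928/eidosian_forge | archive_forge/code/func__octet_bits.py | _octet_bits
-- ===== SOURCE A (Python) =====
-- from typing import Dict, Iterator, List, Optional, Sequence, cast
--
-- def _octet_bits(o: int) -> List[int]:
--     """
--     Get the bits of an octet.
--
--     :param o: The octets.
--     :return: The bits as a list in LSB-to-MSB order.
--     """
--     if not isinstance(o, int):
--         raise TypeError('o should be an int')
--     if not 0 <= o <= 255:
--         raise ValueError('o should be between 0 and 255 inclusive')
--     bits = [0] * 8
--     for i in range(8):
--         if 1 == o & 1:
--             bits[i] = 1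
--         o = o >> 1
--     return bits
-- ===== SOURCE B (Python) =====
-- def _octet_bits(o):
--     if not isinstance(o, int):
--         raise TypeError('o should be an int')
--     if not 0 <= o <= 255:
--         raise ValueError('o should be between 0 and 255 inclusive')
--     return [int(c) for c in f'{o:08b}'[::-1]]
-- ===== Notes on version B (the rewrite author's own statement) =====
-- stated objective: idiomatic
-- what changed: Replaces the shift-and-mask loop over a preallocated list with formatting the octet as an 8-char binary string, reversing it and mapping the characters to ints.
import Mathlib
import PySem

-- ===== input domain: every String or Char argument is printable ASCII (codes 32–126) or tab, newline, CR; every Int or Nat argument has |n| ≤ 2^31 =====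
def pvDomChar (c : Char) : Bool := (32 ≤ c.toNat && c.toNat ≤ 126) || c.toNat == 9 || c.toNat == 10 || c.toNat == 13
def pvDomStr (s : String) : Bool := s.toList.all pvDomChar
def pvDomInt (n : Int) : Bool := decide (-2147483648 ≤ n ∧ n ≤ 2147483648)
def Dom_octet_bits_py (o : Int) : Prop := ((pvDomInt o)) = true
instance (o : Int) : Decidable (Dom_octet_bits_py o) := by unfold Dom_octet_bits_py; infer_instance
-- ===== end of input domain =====

-- B replaces A's shift-and-mask loop over a preallocated list by formatting the octet
-- as an 8-character binary string, reversing it and mapping each character to an int (idiomatic).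

-- ===== PORT A =====
-- Python: bits = [0]*8; for i in range(8): if 1 == o & 1: bits[i] = 1; o = o >> 1; return bits
def octet_bits_py (o : Int) : List Int :=
  ((PySem.List.pyRange 0 8 1).foldl
    (fun (st : List Int × Int) i =>
      (if (1 : Int) = Int.land st.2 1 then st.1.set i.toNat 1 else st.1, st.2 >>> 1))
    (List.replicate 8 (0 : Int), o)).1

-- ===== PORT B =====
-- Python: return [int(c) for c in f'{o:08b}'[::-1]]
-- f'{o:08b}' for 0 ≤ o is Nat.toDigits 2 (binary digits, MSB first) left-padded with '0' to
-- width 8 (exact on Pre_); [::-1] is PySem.List.slice?; int(c) on a binary digit char is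
-- hand-ported exactly as its code point minus 48.
def octet_bits_py_alt (o : Int) : List Int :=
  let digs : List Char := Nat.toDigits 2 o.toNat
  let padded : List Char := List.replicate (8 - digs.length) '0' ++ digs
  ((PySem.List.slice? padded none none (-1)).getD []).map (fun c => ((c.toNat : Int) - 48))

-- ===== PRECONDITION & SPEC =====
-- Pre_ excludes exactly the inputs outside 0..255, on which the Python A raises ValueError.
def Pre_octet_bits_py (o : Int) : Prop := 0 ≤ o ∧ o ≤ 255
instance (o : Int) : Decidable (Pre_octet_bits_py o) := by unfold Pre_octet_bits_py; infer_instance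
def pvWitness_octet_bits_py : Int := (37)

def Spec_octet_bits_py (o : Int) (out : List Int) : Prop := out = octet_bits_py_alt o
instance (o : Int) (out : List Int) : Decidable (Spec_octet_bits_py o out) := by unfold Spec_octet_bits_py; infer_instance

-- ===== CLAIM (what is proved, stated in full; the proofs are below) =====
def Claim_equal_octet_bits_py : Prop := ∀ (o : Int), Dom_octet_bits_py o → Pre_octet_bits_py o → Spec_octet_bits_py o (octet_bits_py o)

-- ===== LEMMAS AND PROOFS =====

-- LSB-first bit list of an Int, k bits (mirrors A's loop body shape).
def lsbInt : Nat → Int → List Int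
  | 0, _ => []
  | k+1, v => (if (1 : Int) = Int.land v 1 then 1 else 0) :: lsbInt k (v >>> 1)

-- LSB-first bit list of a Nat, k bits, via % and /.
def lsbN : Nat → Nat → List Int
  | 0, _ => []
  | k+1, n => (if n % 2 = 1 then 1 else 0) :: lsbN k (n / 2)

-- LSB-first binary digits of n with no leading zeros (natBits 0 = [0]), as toDigits produces (reversed).
def natBits : Nat → List Nat
  | 0 => [0]
  | 1 => [1]
  | n+2 => ((n+2) % 2) :: natBits ((n+2)/2)
decreasing_by exact Nat.div_lt_self (by omega) (by omega)

theorem pyRange8 : PySem.List.pyRange 0 8 1 = (List.range' 0 8).map Int.ofNat := by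
  decide

-- Loop invariant: folding A's body over indices j..j+k-1, starting from a list whose first j
-- entries are pre and whose remaining k entries are 0, appends the k LSB-first bits of v.
theorem foldA_inv : ∀ (k j : Nat) (pre : List Int) (v : Int), pre.length = j →
    (((List.range' j k).map Int.ofNat).foldl
      (fun (st : List Int × Int) i =>
        (if (1 : Int) = Int.land st.2 1 then st.1.set i.toNat 1 else st.1, st.2 >>> 1))
      (pre ++ List.replicate k 0, v)).1 = pre ++ lsbInt k v := by
  intro k
  induction k with
  | zero => intro j pre v _; simp [lsbInt]
  | succ k ih =>
    intro j pre v hlen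
    rw [List.range'_succ, List.map_cons, List.foldl_cons]
    have hset : (pre ++ List.replicate (k+1) (0:Int)).set ((j:Int)).toNat 1
        = pre ++ 1 :: List.replicate k 0 := by
      rw [Int.toNat_natCast, ← hlen, List.set_append_right _ _ (Nat.le_refl _)]
      simp [List.replicate_succ]
    have hstep : (if (1 : Int) = Int.land v 1
          then (pre ++ List.replicate (k+1) (0:Int)).set ((j:Int)).toNat 1
          else pre ++ List.replicate (k+1) 0)
        = (pre ++ [if (1 : Int) = Int.land v 1 then 1 else 0]) ++ List.replicate k 0 := by
      rw [hset]
      split_ifs <;> simp [List.replicate_succ]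
    have ih' := ih (j+1) (pre ++ [if (1 : Int) = Int.land v 1 then 1 else 0]) (v >>> 1)
      (by simp [hlen])
    simp only [Int.toNat_natCast, List.append_assoc, List.singleton_append] at hstep
    simpa [hstep, lsbInt] using ih'

-- A's loop equals the k = 8 LSB-first bit list.
theorem portA_eq_lsbInt (o : Int) : octet_bits_py o = lsbInt 8 o := by
  unfold octet_bits_py
  rw [pyRange8]
  simpa using foldA_inv 8 0 [] o rfl

theorem lsbInt_natCast (k : Nat) : ∀ n : Nat, lsbInt k (n : Int) = lsbN k n := by
  induction k with
  | zero => intro n; rfl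
  | succ k ih =>
    intro n
    show (if (1 : Int) = Int.land (n : Int) 1 then 1 else 0) :: lsbInt k ((n : Int) >>> 1)
        = (if n % 2 = 1 then 1 else 0) :: lsbN k (n / 2)
    have h1 : Int.land (n : Int) 1 = ((n % 2 : Nat) : Int) := by
      have : Int.land (n : Int) ((1 : Nat) : Int) = ((Nat.land n 1 : Nat) : Int) := rfl
      simpa [show Nat.land n 1 = n % 2 from Nat.and_one_is_mod n] using this
    have h2 : (n : Int) >>> 1 = ((n / 2 : Nat) : Int) := by
      have : (n : Int) >>> ((1 : Nat) : Int) = ((n >>> 1 : Nat) : Int) := rfl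
      simpa [Nat.shiftRight_one] using this
    rw [h1, h2, ih]
    congr 1
    have := Nat.mod_two_eq_zero_or_one n
    rcases this with h | h <;> simp [h]

theorem lsbN_zero (k : Nat) : lsbN k 0 = List.replicate k 0 := by
  induction k with
  | zero => rfl
  | succ k ih => simp [lsbN, ih, List.replicate]

-- lsbN k n is natBits n (cast to Int) padded with zeros, when n < 2^k.
theorem lsbN_eq_natBits : ∀ k n, 0 < k → n < 2 ^ k →
    lsbN k n = (natBits n).map (Int.ofNat) ++ List.replicate (k - (natBits n).length) 0 := by
  intro k
  induction k with
  | zero => intro n hk _; omega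
  | succ k ih =>
    intro n _ h
    by_cases hn : n < 2
    · interval_cases n <;> simp [lsbN, natBits, lsbN_zero]
    · obtain ⟨m, rfl⟩ : ∃ m, n = m + 2 := ⟨n - 2, by omega⟩
      have hd : (m + 2) / 2 < 2 ^ k := by
        rw [Nat.pow_succ] at h
        omega
      have hk : 0 < k := by
        by_cases hk0 : k = 0
        · subst hk0; simp at hd
        · omega
      rw [natBits]
      simp only [lsbN, List.map_cons, List.cons_append, List.length_cons]
      congr 1
      · have := Nat.mod_two_eq_zero_or_one (m + 2)
        rcases this with h2 | h2 <;> simp [h2]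
      · rw [ih _ hk hd, Nat.succ_sub_succ]

-- Characterisation of Nat.toDigitsCore base 2: MSB-first digit chars of natBits.
theorem toDigitsCore_two : ∀ f n acc, n < f →
    Nat.toDigitsCore 2 f n acc = ((natBits n).map Nat.digitChar).reverse ++ acc := by
  intro f
  induction f with
  | zero => intro n acc h; omega
  | succ f ih =>
    intro n acc h
    by_cases hn : n < 2
    · have hdiv : n / 2 = 0 := by omega
      interval_cases n <;> simp [Nat.toDigitsCore, natBits]
    · obtain ⟨m, rfl⟩ : ∃ m, n = m + 2 := ⟨n - 2, by omega⟩
      have hdiv : (m + 2) / 2 ≠ 0 := by omega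
      have hlt : (m + 2) / 2 < f := by omega
      rw [show Nat.toDigitsCore 2 (f+1) (m+2) acc
            = Nat.toDigitsCore 2 f ((m+2)/2) (Nat.digitChar ((m+2) % 2) :: acc) by
          simp [Nat.toDigitsCore]]
      rw [ih _ _ hlt, natBits]
      simp

theorem toDigits_two (n : Nat) :
    Nat.toDigits 2 n = ((natBits n).map Nat.digitChar).reverse := by
  have := toDigitsCore_two (n + 1) n [] (by omega)
  simpa [Nat.toDigits] using this

-- natBits digits are binary, so digitChar then "int(c)" gives the digit back.
theorem map_digitChar_back : ∀ n, ((natBits n).map Nat.digitChar).map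
    (fun c => ((c.toNat : Int) - 48)) = (natBits n).map Int.ofNat := by
  intro n
  induction n using natBits.induct with
  | case1 => simp [natBits, Nat.digitChar]
  | case2 => simp [natBits, Nat.digitChar]
  | case3 m ih =>
    rw [natBits]
    simp only [List.map_cons, ih] at *
    congr 1
    have := Nat.mod_two_eq_zero_or_one (m + 2)
    rcases this with h | h <;> simp [h, Nat.digitChar]

-- B's port, rewritten: reverse of the padded digit string, mapped.
theorem portB_eq (o : Int) :
    octet_bits_py_alt o
      = (natBits o.toNat).map Int.ofNat
        ++ List.replicate (8 - (natBits o.toNat).length) 0 := by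
  show ((PySem.List.slice? (List.replicate (8 - (Nat.toDigits 2 o.toNat).length) '0'
      ++ Nat.toDigits 2 o.toNat) none none (-1)).getD []).map (fun c => ((c.toNat : Int) - 48))
    = _
  rw [PySem.List.slice?_none_none_neg_one]
  simp only [Option.getD_some, toDigits_two, List.reverse_append, List.reverse_reverse,
    List.length_reverse, List.length_map, List.map_append, map_digitChar_back]
  congr 1; simp [List.map_replicate, List.reverse_replicate]


-- ===== VERDICT (by name: the statement is the Claim_ definition above) =====
theorem octet_bits_py_spec : Claim_equal_octet_bits_py := by
  intro o _ hpre
  unfold Spec_octet_bits_py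
  obtain ⟨h0, h255⟩ := hpre
  have ho : o = (o.toNat : Int) := (Int.toNat_of_nonneg h0).symm
  have hlt : o.toNat < 2 ^ 8 := by omega
  rw [portA_eq_lsbInt, portB_eq, ho, lsbInt_natCast, lsbN_eq_natBits 8 o.toNat (by omega) hlt]
  simp only [Int.toNat_natCast]
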